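-- pv_equiv track=rewrite | github.com/hoohyeon/A | 프로그래머스/2/389480. 완전범죄/완전범죄.py | solution
-- ===== SOURCE A (Python) =====
-- def solution(info, n, m):
--
--     MAX = 120
--
--     dp = [[False] * MAX for _ in range(MAX)]
--     dp[0][0] = True
--
--     for traceA, traceB in info:
--         next_dp = [[False] * MAX for _ in range(MAX)]
--
--         for a in range(n):
--             for b in range(m):
--                 if not dp[a][b]:
--                     continue
--
--                 if a + traceA < n:
--                     next_dp[a+traceA][b] = True
--
--                 if b + traceB < m:
--                     next_dp[a][b+traceB] = True
--
--
--         dp = [row[:] for row in next_dp]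
--
--     for a in range(n):
--         for b in range(m):
--             if dp[a][b]:
--                 return a
--
--     return -1
-- ===== SOURCE B (Python) =====
-- def solution(info, n, m):
--     # 1D dp over the B-trace coordinate: best[b] = minimal A-trace sum among
--     # assignments whose B-trace sum is b (sentinel n = unreachable).
--     if n <= 0 or m <= 0:
--         return -1
--     best = [n] * m
--     best[0] = 0
--     for ta, tb in info:
--         nxt = [n] * m
--         for b in range(m):
--             a = best[b]
--             if a >= n:
--                 continue
--             if a + ta < n and a + ta < nxt[b]:
--                 nxt[b] = a + ta
--             if b + tb < m and a < nxt[b + tb]: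
--                 nxt[b + tb] = a
--         best = nxt
--     ans = min(best)
--     return ans if ans < n else -1
-- ===== Notes on version B (the rewrite author's own statement) =====
-- stated objective: alternative
-- what changed: replaces the 120x120 boolean reachability grid rebuilt and rescanned per item with a 1D dp over the B-trace sum that keeps only the minimal A-trace sum per cell (dominance argument), so the whole n-dimension of the state disappears (O(k*m) work per run instead of O(k*n*m); a timing run could not confirm the speed-up because A raises on most large random inputs)
-- outside the precondition, e.g. on solution([(-1, 1)], 3, 3): A returns 0, B returns -1; on solution([(1, -1)], 3, 3): A returns 1, B returns 0
import Mathlib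
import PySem

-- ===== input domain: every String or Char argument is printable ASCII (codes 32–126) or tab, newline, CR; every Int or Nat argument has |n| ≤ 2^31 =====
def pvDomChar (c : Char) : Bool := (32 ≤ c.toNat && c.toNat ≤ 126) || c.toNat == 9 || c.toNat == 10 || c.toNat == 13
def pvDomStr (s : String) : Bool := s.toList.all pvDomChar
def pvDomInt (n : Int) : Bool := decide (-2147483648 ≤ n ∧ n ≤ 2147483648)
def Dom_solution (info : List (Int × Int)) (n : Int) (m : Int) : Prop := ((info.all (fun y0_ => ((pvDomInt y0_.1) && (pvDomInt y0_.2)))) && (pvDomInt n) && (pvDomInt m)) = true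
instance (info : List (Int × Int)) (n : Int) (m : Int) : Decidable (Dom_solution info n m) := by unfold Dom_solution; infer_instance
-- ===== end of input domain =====

-- B replaces A's per-item rebuild of a 120×120 boolean reachability grid (and its full n×m rescan)
-- by a 1D dp over the B-trace coordinate that keeps only the minimal A-trace sum per cell.

-- ===== PORT A =====
-- dp[a][b] read and dp[a][b] = True on the list-of-lists grid (indices in range at every use under Pre_)
def pvGet (g : List (List Bool)) (a b : Int) : Bool := (g.getD a.toNat []).getD b.toNat false
def pvSetT (g : List (List Bool)) (a b : Int) : List (List Bool) :=
  g.set a.toNat ((g.getD a.toNat []).set b.toNat true)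

-- the body of A's inner loop: 'if not dp[a][b]: continue' and the two guarded writes
def pvBodyA (n m : Int) (t : Int × Int) (dp next : List (List Bool)) (a b : Int) : List (List Bool) :=
  if !(pvGet dp a b) then next
  else
    let next1 := if a + t.1 < n then pvSetT next (a + t.1) b else next
    if b + t.2 < m then pvSetT next1 a (b + t.2) else next1

-- one item's round of A: 'next_dp = [[False]*MAX …]; for a in range(n): for b in range(m): …'
def pvStepA (n m : Int) (t : Int × Int) (dp : List (List Bool)) : List (List Bool) :=
  (PySem.List.pyRange 0 n 1).foldl (fun next a =>
    (PySem.List.pyRange 0 m 1).foldl (fun next b => pvBodyA n m t dp next a b) next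
  ) (List.replicate 120 (List.replicate 120 false))

def solution (info : List (Int × Int)) (n : Int) (m : Int) : Int :=
  -- MAX = 120; dp = [[False]*MAX for _ in range(MAX)]; dp[0][0] = True
  -- ('dp = [row[:] for row in next_dp]' is a plain copy: Lean lists are immutable values)
  let dp := info.foldl (fun dp t => pvStepA n m t dp)
    (pvSetT (List.replicate 120 (List.replicate 120 false)) 0 0)
  -- final scan: return the first a (ascending) with some dp[a][b] true, else -1
  ((PySem.List.pyRange 0 n 1).findSome? (fun a =>
    (PySem.List.pyRange 0 m 1).findSome? (fun b => if pvGet dp a b then some a else none))).getD (-1)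

-- ===== PORT B =====
-- the body of B's loop: skip unreachable cells, then relax the two moves into nxt
-- (list reads best[b] / nxt[...] are in range at every use under Pre_)
def pvBodyB (n m : Int) (t : Int × Int) (best nxt : List Int) (b : Int) : List Int :=
  let a := best.getD b.toNat n
  if n ≤ a then nxt
  else
    let nxt1 := if a + t.1 < n ∧ a + t.1 < nxt.getD b.toNat n then nxt.set b.toNat (a + t.1) else nxt
    if b + t.2 < m ∧ a < nxt1.getD (b + t.2).toNat n then nxt1.set (b + t.2).toNat a else nxt1

-- one item's round of B: 'nxt = [n]*m; for b in range(m): …'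
def pvStepB (n m : Int) (t : Int × Int) (best : List Int) : List Int :=
  (PySem.List.pyRange 0 m 1).foldl (fun nxt b => pvBodyB n m t best nxt b)
    (List.replicate m.toNat n)

def solution_alt (info : List (Int × Int)) (n : Int) (m : Int) : Int :=
  if n ≤ 0 ∨ m ≤ 0 then -1
  else
    -- best = [n]*m; best[0] = 0
    let best := info.foldl (fun best t => pvStepB n m t best) ((List.replicate m.toNat n).set 0 0)
    -- ans = min(best): folded over the m cells from the sentinel n (every cell holds a value ≤ n,
    -- so this equals Python's min over the nonempty list)
    let ans := (PySem.List.pyRange 0 m 1).foldl (fun acc b => min acc (best.getD b.toNat n)) n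
    if ans < n then ans else -1

-- ===== PRECONDITION & SPEC =====
-- Pre_ excludes (a) n/m large enough to overflow A's fixed 120×120 buffer while the other bound is
-- positive — A raises IndexError there — and (b) when both bounds are positive (otherwise the dp is
-- never touched), trace values outside the problem's natural domain (negative trace amounts), where
-- Python's negative list indices make A's value an accident of the 120-wide buffer (A may also
-- raise there for traces < -120).
def Pre_solution (info : List (Int × Int)) (n : Int) (m : Int) : Prop :=
  (n ≤ 120 ∨ m ≤ 0) ∧ (m ≤ 120 ∨ n ≤ 0) ∧
    (0 < n → 0 < m → ∀ p ∈ info, 0 ≤ p.1 ∧ 0 ≤ p.2)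
instance (info : List (Int × Int)) (n : Int) (m : Int) : Decidable (Pre_solution info n m) := by
  unfold Pre_solution; infer_instance

def pvWitness_solution : (List (Int × Int)) × Int × Int := ([(2, 3), (4, 1), (0, 2)], 6, 5)

def Spec_solution (info : List (Int × Int)) (n : Int) (m : Int) (out : Int) : Prop := out = solution_alt info n m
instance (info : List (Int × Int)) (n : Int) (m : Int) (out : Int) : Decidable (Spec_solution info n m out) := by unfold Spec_solution; infer_instance

-- ===== CLAIM (what is proved, stated in full; the proofs are below) =====
def Claim_equal_solution : Prop := ∀ (info : List (Int × Int)) (n : Int) (m : Int), Dom_solution info n m → Pre_solution info n m → Spec_solution info n m (solution info n m)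

-- ===== LEMMAS AND PROOFS =====

theorem solution_witness_ok :
    Dom_solution pvWitness_solution.1 pvWitness_solution.2.1 pvWitness_solution.2.2 ∧
    Pre_solution pvWitness_solution.1 pvWitness_solution.2.1 pvWitness_solution.2.2 := by
  constructor <;> decide

-- abbreviation for B's list read (definitionally best[b] with default n)
def pvGetB (n : Int) (l : List Int) (b : Int) : Int := l.getD b.toNat n
lemma pvGetB_def (n : Int) (l : List Int) (b : Int) : pvGetB n l b = l.getD b.toNat n := rfl

-- grid shape: 120 rows of 120 cells
def pvShapeA (g : List (List Bool)) : Prop := g.length = 120 ∧ ∀ r ∈ g, r.length = 120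

-- list shape maintained by B's round: right length, all cells ≤ n
def pvSB (n m : Int) (l : List Int) : Prop := l.length = m.toNat ∧ ∀ v ∈ l, v ≤ n

-- the single write A's inner body performs, as a Boolean contribution
def pvHA (n m : Int) (t : Int × Int) (dp : List (List Bool)) (a b x y : Int) : Bool :=
  pvGet dp a b && ((decide (a + t.1 < n) && decide (x = a + t.1) && decide (y = b)) ||
             (decide (b + t.2 < m) && decide (x = a) && decide (y = b + t.2)))

-- the (at most two) candidate values B's body offers target cell x from source cell b (n = no offer)
def pvCB (n m : Int) (t : Int × Int) (best : Int → Int) (b x : Int) : Int :=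
  if n ≤ best b then n
  else min (if x = b ∧ best b + t.1 < n then best b + t.1 else n)
           (if x = b + t.2 ∧ b + t.2 < m then best b else n)

-- ========== grid read/write facts ==========

lemma pvShapeA_replicate : pvShapeA (List.replicate 120 (List.replicate 120 false)) := by
  refine ⟨by simp, ?_⟩
  intro r hr
  rw [List.eq_of_mem_replicate hr]
  simp

lemma pvShapeA_set (g : List (List Bool)) (a b : Int) (h : pvShapeA g)
    (ha : 0 ≤ a) (ha' : a < 120) : pvShapeA (pvSetT g a b) := by
  obtain ⟨hg1, hg2⟩ := h
  have hlen : a.toNat < g.length := by omega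
  refine ⟨by simp [pvSetT, hg1], ?_⟩
  intro r hr
  rcases List.mem_or_eq_of_mem_set hr with h' | h'
  · exact hg2 r h'
  · subst h'
    rw [List.length_set, List.getD_eq_getElem?_getD, List.getElem?_eq_getElem hlen]
    exact hg2 _ (List.getElem_mem hlen)

lemma pvGetDset_self {α : Type} (l : List α) (i : Nat) (v d : α) (h : i < l.length) :
    (l.set i v).getD i d = v := by
  simp [List.getD_eq_getElem?_getD, h]

lemma pvGetDset_ne {α : Type} (l : List α) (i j : Nat) (v d : α) (h : i ≠ j) :
    (l.set i v).getD j d = l.getD j d := by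
  simp [List.getD_eq_getElem?_getD, List.getElem?_set_ne h]

lemma pvGetD_oob {α : Type} (l : List α) (i : Nat) (d : α) (h : l.length ≤ i) :
    l.getD i d = d := by
  rw [List.getD_eq_getElem?_getD, List.getElem?_eq_none h]
  rfl

lemma pvGet_replicate (k j : Nat) (x y : Int) :
    pvGet (List.replicate k (List.replicate j false)) x y = false := by
  unfold pvGet
  by_cases hx : x.toNat < k
  · rw [List.getD_replicate _ hx]
    by_cases hy : y.toNat < j
    · rw [List.getD_replicate _ hy]
    · rw [pvGetD_oob _ _ _ (by simpa using hy)]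
  · rw [pvGetD_oob (List.replicate k (List.replicate j false)) x.toNat [] (by simpa using hx)]
    rfl

lemma pvGet_set (g : List (List Bool)) (a b x y : Int) (hS : pvShapeA g)
    (ha : 0 ≤ a) (ha' : a < 120) (hb : 0 ≤ b) (hb' : b < 120) (hx : 0 ≤ x) (hy : 0 ≤ y) :
    pvGet (pvSetT g a b) x y = ((decide (x = a) && decide (y = b)) || pvGet g x y) := by
  obtain ⟨hg1, hg2⟩ := hS
  have hlen : a.toNat < g.length := by omega
  have hrow : (g.getD a.toNat []).length = 120 := by
    rw [List.getD_eq_getElem?_getD, List.getElem?_eq_getElem hlen]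
    exact hg2 _ (List.getElem_mem hlen)
  unfold pvGet pvSetT
  by_cases hxa : x = a
  · subst hxa
    rw [pvGetDset_self g x.toNat _ [] hlen]
    by_cases hyb : y = b
    · subst hyb
      rw [pvGetDset_self _ y.toNat true false (by omega)]
      simp
    · rw [pvGetDset_ne _ b.toNat y.toNat true false (by omega)]
      simp [hyb]
  · rw [pvGetDset_ne g a.toNat x.toNat _ [] (by omega)]
    simp [hxa]

-- ========== generic fold lemmas (state read through an abstraction, with a state predicate) ==========

lemma pvFoldPres {γ : Type} (S : γ → Prop) :
    ∀ (l : List Int) (f : γ → Int → γ), (∀ g c, c ∈ l → S g → S (f g c)) →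
      ∀ g0, S g0 → S (l.foldl f g0) := by
  intro l f
  induction l with
  | nil => intro _ g0 h; exact h
  | cons c l ih =>
    intro hpres g0 hS0
    exact ih (fun g c' hc' => hpres g c' (List.mem_cons_of_mem _ hc'))
      (f g0 c) (hpres g0 c List.mem_cons_self hS0)

lemma pvFoldOrG {γ : Type} (read : γ → Int → Int → Bool) (S : γ → Prop)
    (H : Int → Int → Int → Bool) :
    ∀ (l : List Int) (f : γ → Int → γ),
      (∀ g c, c ∈ l → S g → S (f g c)) →
      (∀ g c x y, c ∈ l → S g → 0 ≤ x → 0 ≤ y → read (f g c) x y = (read g x y || H c x y)) →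
      ∀ g0, S g0 → ∀ x y, 0 ≤ x → 0 ≤ y →
        read (l.foldl f g0) x y = (read g0 x y || l.any (fun c => H c x y)) := by
  intro l f
  induction l with
  | nil => intro _ _ g0 _ x y _ _; simp
  | cons c l ih =>
    intro hpres hf g0 hS0 x y hx hy
    simp only [List.foldl_cons, List.any_cons]
    rw [ih (fun g c' hc' => hpres g c' (List.mem_cons_of_mem _ hc'))
        (fun g c' x' y' hc' => hf g c' x' y' (List.mem_cons_of_mem _ hc'))
        (f g0 c) (hpres g0 c List.mem_cons_self hS0) x y hx hy,
      hf g0 c x y List.mem_cons_self hS0 hx hy]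
    simp [Bool.or_assoc]

lemma pvFoldMinG {γ : Type} (read : γ → Int → Int) (S : γ → Prop) (C : Int → Int → Int) :
    ∀ (l : List Int) (f : γ → Int → γ),
      (∀ g c, c ∈ l → S g → S (f g c)) →
      (∀ g c x, c ∈ l → S g → 0 ≤ x → read (f g c) x = min (read g x) (C c x)) →
      ∀ g0, S g0 → ∀ x, 0 ≤ x →
        read (l.foldl f g0) x = l.foldl (fun v c => min v (C c x)) (read g0 x) := by
  intro l f
  induction l with
  | nil => intro _ _ g0 _ x _; rfl
  | cons c l ih =>
    intro hpres hf g0 hS0 x hx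
    simp only [List.foldl_cons]
    rw [ih (fun g c' hc' => hpres g c' (List.mem_cons_of_mem _ hc'))
        (fun g c' x' hc' => hf g c' x' (List.mem_cons_of_mem _ hc'))
        (f g0 c) (hpres g0 c List.mem_cons_self hS0) x hx,
      hf g0 c x List.mem_cons_self hS0 hx]

-- ========== characterisation of A's round ==========

lemma pvBodyA_eq (n m : Int) (t : Int × Int) (dp next : List (List Bool)) (a b : Int) :
    pvBodyA n m t dp next a b =
      if pvGet dp a b = true then
        (if b + t.2 < m then
          pvSetT (if a + t.1 < n then pvSetT next (a + t.1) b else next) a (b + t.2)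
         else (if a + t.1 < n then pvSetT next (a + t.1) b else next))
      else next := by
  unfold pvBodyA
  by_cases hdp : pvGet dp a b
  · rw [if_neg (by simp [hdp]), if_pos hdp]
  · rw [if_pos (by simp [hdp]), if_neg hdp]

lemma pvBodyA_shape (n m : Int) (t : Int × Int) (dp next : List (List Bool)) (a b : Int)
    (hSg : pvShapeA next) (ha0 : 0 ≤ a) (han : a < n) (hn : n ≤ 120)
    (hb0 : 0 ≤ b) (hbm : b < m) (hm : m ≤ 120) (ht1 : 0 ≤ t.1) (ht2 : 0 ≤ t.2) :
    pvShapeA (pvBodyA n m t dp next a b) := by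
  rw [pvBodyA_eq]
  by_cases hdp : pvGet dp a b = true
  · rw [if_pos hdp]
    have hS1 : pvShapeA (if a + t.1 < n then pvSetT next (a + t.1) b else next) := by
      by_cases h1 : a + t.1 < n
      · rw [if_pos h1]; exact pvShapeA_set _ _ _ hSg (by omega) (by omega)
      · rw [if_neg h1]; exact hSg
    by_cases h2 : b + t.2 < m
    · rw [if_pos h2]; exact pvShapeA_set _ _ _ hS1 (by omega) (by omega)
    · rw [if_neg h2]; exact hS1
  · rw [if_neg hdp]; exact hSg

lemma pvBodyA_read (n m : Int) (t : Int × Int) (dp next : List (List Bool)) (a b x y : Int)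
    (hSg : pvShapeA next) (ha0 : 0 ≤ a) (han : a < n) (hn : n ≤ 120)
    (hb0 : 0 ≤ b) (hbm : b < m) (hm : m ≤ 120) (ht1 : 0 ≤ t.1) (ht2 : 0 ≤ t.2)
    (hx : 0 ≤ x) (hy : 0 ≤ y) :
    pvGet (pvBodyA n m t dp next a b) x y = (pvGet next x y || pvHA n m t dp a b x y) := by
  rw [pvBodyA_eq]
  by_cases hdp : pvGet dp a b = true
  · rw [if_pos hdp]
    have hS1 : pvShapeA (if a + t.1 < n then pvSetT next (a + t.1) b else next) := by
      by_cases h1 : a + t.1 < n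
      · rw [if_pos h1]; exact pvShapeA_set _ _ _ hSg (by omega) (by omega)
      · rw [if_neg h1]; exact hSg
    have e1 : pvGet (if a + t.1 < n then pvSetT next (a + t.1) b else next) x y
        = (pvGet next x y || (decide (a + t.1 < n) && decide (x = a + t.1) && decide (y = b))) := by
      by_cases h1 : a + t.1 < n
      · rw [if_pos h1, pvGet_set next _ b x y hSg (by omega) (by omega) (by omega) (by omega) hx hy]
        simp [h1, Bool.or_comm]
      · rw [if_neg h1]
        simp [h1]
    by_cases h2 : b + t.2 < m
    · rw [if_pos h2, pvGet_set _ a _ x y hS1 (by omega) (by omega) (by omega) (by omega) hx hy, e1]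
      simp [pvHA, hdp, h2, Bool.or_assoc, Bool.or_comm, Bool.or_left_comm]
    · rw [if_neg h2, e1]
      simp [pvHA, hdp, h2]
  · rw [if_neg hdp]
    have hdp' : pvGet dp a b = false := by simpa using hdp
    simp [pvHA, hdp']

lemma pvStepA_shape (n m : Int) (t : Int × Int) (dp : List (List Bool))
    (hn : n ≤ 120) (hm : m ≤ 120) (ht1 : 0 ≤ t.1) (ht2 : 0 ≤ t.2) :
    pvShapeA (pvStepA n m t dp) := by
  unfold pvStepA
  refine pvFoldPres pvShapeA _ _ ?_ _ pvShapeA_replicate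
  intro g a ha hSg
  obtain ⟨ha0, han⟩ := PySem.List.mem_pyRange_one.mp ha
  refine pvFoldPres pvShapeA _ _ ?_ g hSg
  intro g' b hb hSg'
  obtain ⟨hb0, hbm⟩ := PySem.List.mem_pyRange_one.mp hb
  exact pvBodyA_shape n m t dp g' a b hSg' ha0 han hn hb0 hbm hm ht1 ht2

lemma pvStepA_char (n m : Int) (t : Int × Int) (dp : List (List Bool)) (x y : Int)
    (hn : n ≤ 120) (hm : m ≤ 120) (ht1 : 0 ≤ t.1) (ht2 : 0 ≤ t.2) (hx : 0 ≤ x) (hy : 0 ≤ y) :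
    pvGet (pvStepA n m t dp) x y =
      (PySem.List.pyRange 0 n 1).any (fun a =>
        (PySem.List.pyRange 0 m 1).any (fun b => pvHA n m t dp a b x y)) := by
  unfold pvStepA
  rw [pvFoldOrG pvGet pvShapeA
      (fun a x y => (PySem.List.pyRange 0 m 1).any (fun b => pvHA n m t dp a b x y))
      _ _ ?_ ?_ _ pvShapeA_replicate x y hx hy, pvGet_replicate]
  · simp
  · -- shape preservation of the inner loop
    intro g a ha hSg
    obtain ⟨ha0, han⟩ := PySem.List.mem_pyRange_one.mp ha
    refine pvFoldPres pvShapeA _ _ ?_ g hSg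
    intro g' b hb hSg'
    obtain ⟨hb0, hbm⟩ := PySem.List.mem_pyRange_one.mp hb
    exact pvBodyA_shape n m t dp g' a b hSg' ha0 han hn hb0 hbm hm ht1 ht2
  · -- the inner loop adds exactly the contributions of row a
    intro g a x' y' ha hSg hx' hy'
    obtain ⟨ha0, han⟩ := PySem.List.mem_pyRange_one.mp ha
    rw [pvFoldOrG pvGet pvShapeA (fun b x y => pvHA n m t dp a b x y) _ _ ?_ ?_ g hSg x' y' hx' hy']
    · intro g' b hb hSg'
      obtain ⟨hb0, hbm⟩ := PySem.List.mem_pyRange_one.mp hb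
      exact pvBodyA_shape n m t dp g' a b hSg' ha0 han hn hb0 hbm hm ht1 ht2
    · intro g' b x'' y'' hb hSg' hx'' hy''
      obtain ⟨hb0, hbm⟩ := PySem.List.mem_pyRange_one.mp hb
      exact pvBodyA_read n m t dp g' a b x'' y'' hSg' ha0 han hn hb0 hbm hm ht1 ht2 hx'' hy''

lemma pvStepA_iff (n m : Int) (t : Int × Int) (dp : List (List Bool)) (x y : Int)
    (hn : n ≤ 120) (hm : m ≤ 120) (ht1 : 0 ≤ t.1) (ht2 : 0 ≤ t.2) (hx : 0 ≤ x) (hy : 0 ≤ y) :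
    pvGet (pvStepA n m t dp) x y = true ↔
      ∃ a b, 0 ≤ a ∧ a < n ∧ 0 ≤ b ∧ b < m ∧ pvGet dp a b = true ∧
        ((a + t.1 < n ∧ x = a + t.1 ∧ y = b) ∨ (b + t.2 < m ∧ x = a ∧ y = b + t.2)) := by
  rw [pvStepA_char n m t dp x y hn hm ht1 ht2 hx hy]
  simp only [List.any_eq_true, PySem.List.mem_pyRange_one, pvHA, Bool.and_eq_true,
    Bool.or_eq_true, decide_eq_true_eq]
  constructor
  · rintro ⟨a, ⟨ha1, ha2⟩, b, ⟨hb1, hb2⟩, hdp, hcase⟩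
    exact ⟨a, b, ha1, ha2, hb1, hb2, hdp, by tauto⟩
  · rintro ⟨a, b, ha1, ha2, hb1, hb2, hdp, hcase⟩
    exact ⟨a, ⟨ha1, ha2⟩, b, ⟨hb1, hb2⟩, hdp, by tauto⟩

-- ========== characterisation of B's round ==========

lemma pvGetB_le (n : Int) (l : List Int) (b : Int) (h : ∀ v ∈ l, v ≤ n) : pvGetB n l b ≤ n := by
  unfold pvGetB
  rw [List.getD_eq_getElem?_getD]
  cases h' : l[b.toNat]? with
  | none => simp
  | some v => simpa using h v (List.mem_of_getElem? h')

lemma pvGetB_set (n : Int) (l : List Int) (i x v : Int) (hi : 0 ≤ i) (hil : i.toNat < l.length)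
    (hx : 0 ≤ x) :
    pvGetB n (l.set i.toNat v) x = if x = i then v else pvGetB n l x := by
  by_cases hxi : x = i
  · subst hxi
    simp [pvGetB, List.getD_eq_getElem?_getD, hil]
  · have hne : i.toNat ≠ x.toNat := by omega
    simp [pvGetB, List.getD_eq_getElem?_getD, List.getElem?_set_ne hne, hxi]

lemma pvGetB_replicate (n : Int) (k : Nat) (x : Int) : pvGetB n (List.replicate k n) x = n := by
  unfold pvGetB
  by_cases hx : x.toNat < k
  · exact List.getD_replicate n hx
  · exact pvGetD_oob _ _ _ (by simpa using hx)

lemma pvSB_replicate (n m : Int) : pvSB n m (List.replicate m.toNat n) := by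
  refine ⟨by simp, ?_⟩
  intro v hv
  rw [List.eq_of_mem_replicate hv]

lemma pvWriteMinL (n : Int) (nxt : List Int) (i v x : Int) (g : Prop) [Decidable g]
    (hx : 0 ≤ x) (hle : ∀ z ∈ nxt, z ≤ n)
    (hbound : g → 0 ≤ i ∧ i.toNat < nxt.length) :
    pvGetB n (if g ∧ v < pvGetB n nxt i then nxt.set i.toNat v else nxt) x
      = min (pvGetB n nxt x) (if x = i ∧ g then v else n) := by
  by_cases hg : g
  · obtain ⟨hi0, hil⟩ := hbound hg
    by_cases hcmp : v < pvGetB n nxt i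
    · rw [if_pos ⟨hg, hcmp⟩, pvGetB_set n nxt i x v hi0 hil hx]
      by_cases hxi : x = i
      · subst hxi
        rw [if_pos rfl, if_pos ⟨rfl, hg⟩]
        exact (min_eq_right (le_of_lt hcmp)).symm
      · rw [if_neg hxi, if_neg (by tauto)]
        exact (min_eq_left (pvGetB_le n nxt x hle)).symm
    · rw [if_neg (by tauto)]
      by_cases hxi : x = i
      · subst hxi
        rw [if_pos ⟨rfl, hg⟩]
        exact (min_eq_left (by omega)).symm
      · rw [if_neg (by tauto)]
        exact (min_eq_left (pvGetB_le n nxt x hle)).symm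
  · rw [if_neg (by tauto), if_neg (by tauto)]
    exact (min_eq_left (pvGetB_le n nxt x hle)).symm

lemma pvSetLe (n : Int) (l : List Int) (i : Nat) (v : Int) (hl : ∀ z ∈ l, z ≤ n) (hv : v ≤ n) :
    ∀ z ∈ l.set i v, z ≤ n := by
  intro z hz
  rcases List.mem_or_eq_of_mem_set hz with h' | h'
  · exact hl z h'
  · omega

lemma pvBodyB_shape (n m : Int) (t : Int × Int) (best nxt : List Int) (b : Int)
    (hSg : pvSB n m nxt) : pvSB n m (pvBodyB n m t best nxt b) := by
  simp only [pvBodyB, ← pvGetB_def]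
  by_cases hs : n ≤ pvGetB n best b
  · rw [if_pos hs]; exact hSg
  · rw [if_neg hs]
    set X := (if pvGetB n best b + t.1 < n ∧ pvGetB n best b + t.1 < pvGetB n nxt b
      then nxt.set b.toNat (pvGetB n best b + t.1) else nxt) with hX
    have hSX : pvSB n m X := by
      rw [hX]
      by_cases h1 : pvGetB n best b + t.1 < n ∧ pvGetB n best b + t.1 < pvGetB n nxt b
      · rw [if_pos h1]
        exact ⟨by simp [hSg.1], pvSetLe n nxt _ _ hSg.2 (by omega)⟩
      · rw [if_neg h1]; exact hSg
    by_cases h2 : b + t.2 < m ∧ pvGetB n best b < pvGetB n X (b + t.2)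
    · rw [if_pos h2]
      exact ⟨by simp [hSX.1], pvSetLe n X _ _ hSX.2 (by omega)⟩
    · rw [if_neg h2]; exact hSX

lemma pvBodyB_read (n m : Int) (t : Int × Int) (best nxt : List Int) (b x : Int)
    (hb0 : 0 ≤ b) (hbm : b < m) (ht2 : 0 ≤ t.2) (hSg : pvSB n m nxt) (hx : 0 ≤ x) :
    pvGetB n (pvBodyB n m t best nxt b) x
      = min (pvGetB n nxt x) (pvCB n m t (pvGetB n best) b x) := by
  simp only [pvBodyB, ← pvGetB_def]
  by_cases hs : n ≤ pvGetB n best b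
  · rw [if_pos hs]
    unfold pvCB
    rw [if_pos hs]
    exact (min_eq_left (pvGetB_le n nxt x hSg.2)).symm
  · rw [if_neg hs]
    have e1 := pvWriteMinL n nxt b (pvGetB n best b + t.1) x (pvGetB n best b + t.1 < n)
      hx hSg.2 (fun _ => ⟨hb0, by have := hSg.1; omega⟩)
    have hSX : pvSB n m (if pvGetB n best b + t.1 < n ∧ pvGetB n best b + t.1 < pvGetB n nxt b
        then nxt.set b.toNat (pvGetB n best b + t.1) else nxt) := by
      by_cases h1 : pvGetB n best b + t.1 < n ∧ pvGetB n best b + t.1 < pvGetB n nxt b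
      · rw [if_pos h1]
        exact ⟨by simp [hSg.1], pvSetLe n nxt _ _ hSg.2 (by omega)⟩
      · rw [if_neg h1]; exact hSg
    have e2 := pvWriteMinL n _ (b + t.2) (pvGetB n best b) x (b + t.2 < m)
      hx hSX.2 (fun hg => ⟨by omega, by have := hSX.1; omega⟩)
    rw [e2, e1, min_assoc]
    unfold pvCB
    rw [if_neg hs]

lemma pvStepB_char (n m : Int) (t : Int × Int) (best : List Int) (x : Int)
    (ht2 : 0 ≤ t.2) (hx : 0 ≤ x) :
    pvGetB n (pvStepB n m t best) x =
      (PySem.List.pyRange 0 m 1).foldl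
        (fun v b => min v (pvCB n m t (pvGetB n best) b x)) n := by
  unfold pvStepB
  rw [pvFoldMinG (pvGetB n) (pvSB n m) (fun b x => pvCB n m t (pvGetB n best) b x) _ _
      ?_ ?_ _ (pvSB_replicate n m) x hx, pvGetB_replicate]
  · intro g b hb hSg
    exact pvBodyB_shape n m t best g b hSg
  · intro g b x' hb hSg hx'
    obtain ⟨hb0, hbm⟩ := PySem.List.mem_pyRange_one.mp hb
    exact pvBodyB_read n m t best g b x' hb0 hbm ht2 hSg hx'

lemma pvStepB_shape (n m : Int) (t : Int × Int) (best : List Int) :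
    pvSB n m (pvStepB n m t best) := by
  unfold pvStepB
  exact pvFoldPres (pvSB n m) _ _ (fun g b _ hSg => pvBodyB_shape n m t best g b hSg)
    _ (pvSB_replicate n m)

-- r := foldl min over the candidates: the standard facts
lemma pvFoldMin_le (l : List Int) (C : Int → Int) (n : Int) :
    (l.foldl (fun v c => min v (C c)) n ≤ n) ∧
      ∀ c ∈ l, l.foldl (fun v c => min v (C c)) n ≤ C c := by
  have h := PySem.List.foldl_min_le (l.map C) n
  rw [List.foldl_map] at h
  exact ⟨h.1, fun c hc => h.2 (C c) (List.mem_map_of_mem hc)⟩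

lemma pvFoldMin_mem (l : List Int) (C : Int → Int) (n : Int) :
    l.foldl (fun v c => min v (C c)) n = n ∨
      ∃ c ∈ l, l.foldl (fun v c => min v (C c)) n = C c := by
  have h := PySem.List.foldl_min_mem (l.map C) n
  rw [List.foldl_map] at h
  rcases h with h | h
  · exact Or.inl h
  · rcases List.mem_map.mp h with ⟨c, hc, he⟩
    exact Or.inr ⟨c, hc, he.symm⟩

-- ========== the simulation invariant ==========

-- dp's true cells (at nonnegative coordinates) lie in [0,n)×[0,m), and per column b,
-- best[b] is the least a with dp[a][b] (n when the column is empty)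
def pvInv (n m : Int) (dp : List (List Bool)) (best : List Int) : Prop :=
  pvShapeA dp ∧ pvSB n m best ∧
  (∀ a b, 0 ≤ a → 0 ≤ b → pvGet dp a b = true → a < n ∧ b < m) ∧
  (∀ b, 0 ≤ b → b < m →
    (∀ a, 0 ≤ a → pvGet dp a b = true → pvGetB n best b ≤ a) ∧
    (pvGetB n best b = n ∨ (0 ≤ pvGetB n best b ∧ pvGet dp (pvGetB n best b) b = true)))

lemma pvInv_init (n m : Int) (hn : 0 < n) (hm : 0 < m) (hn120 : n ≤ 120) (hm120 : m ≤ 120) :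
    pvInv n m (pvSetT (List.replicate 120 (List.replicate 120 false)) 0 0)
      ((List.replicate m.toNat n).set 0 0) := by
  have hget : ∀ x y : Int, 0 ≤ x → 0 ≤ y →
      pvGet (pvSetT (List.replicate 120 (List.replicate 120 false)) 0 0) x y
        = ((decide (x = 0) && decide (y = 0)) || false) := by
    intro x y hx hy
    rw [pvGet_set _ 0 0 x y pvShapeA_replicate (by omega) (by omega) (by omega) (by omega) hx hy,
      pvGet_replicate]
  have hbest : ∀ b : Int, 0 ≤ b → pvGetB n ((List.replicate m.toNat n).set 0 0) b
      = if b = 0 then 0 else n := by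
    intro b hb
    have hset := pvGetB_set n (List.replicate m.toNat n) 0 b 0 le_rfl
      (by simp; omega) hb
    simp only [Int.toNat_zero] at hset
    rw [hset, pvGetB_replicate]
  refine ⟨pvShapeA_set _ 0 0 pvShapeA_replicate (by omega) (by omega), ?_, ?_, ?_⟩
  · refine ⟨by simp, pvSetLe n _ _ _ (pvSB_replicate n m).2 (by omega)⟩
  · intro a b ha hb hT
    rw [hget a b ha hb] at hT
    simp at hT
    omega
  · intro b hb hbm
    rw [hbest b hb]
    constructor
    · intro a ha hT
      rw [hget a b ha hb] at hT
      simp at hT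
      split_ifs <;> omega
    · by_cases hb0 : b = 0
      · subst hb0
        rw [if_pos rfl]
        refine Or.inr ⟨le_rfl, ?_⟩
        rw [hget 0 0 le_rfl le_rfl]
        simp
      · rw [if_neg hb0]
        exact Or.inl rfl

lemma pvInv_step (n m : Int) (t : Int × Int) (dp : List (List Bool)) (best : List Int)
    (hn : 0 < n) (hm : 0 < m) (hn120 : n ≤ 120) (hm120 : m ≤ 120)
    (ht1 : 0 ≤ t.1) (ht2 : 0 ≤ t.2)
    (h : pvInv n m dp best) : pvInv n m (pvStepA n m t dp) (pvStepB n m t best) := by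
  obtain ⟨hSA, hSB, hB, hM⟩ := h
  refine ⟨pvStepA_shape n m t dp hn120 hm120 ht1 ht2, pvStepB_shape n m t best, ?_, ?_⟩
  · intro x y hx hy hxy
    rw [pvStepA_iff n m t dp x y hn120 hm120 ht1 ht2 hx hy] at hxy
    obtain ⟨a, b, ha0, han, hb0, hbm, hdp, hc⟩ := hxy
    rcases hc with ⟨h1, rfl, rfl⟩ | ⟨h2, rfl, rfl⟩ <;> omega
  · intro b' h0 hm'
    have hle := pvFoldMin_le (PySem.List.pyRange 0 m 1)
      (fun b => pvCB n m t (pvGetB n best) b b') n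
    have hmem := pvFoldMin_mem (PySem.List.pyRange 0 m 1)
      (fun b => pvCB n m t (pvGetB n best) b b') n
    constructor
    · intro a' ha' hdp'
      rw [pvStepA_iff n m t dp a' b' hn120 hm120 ht1 ht2 ha' h0] at hdp'
      obtain ⟨a, b, ha0, han, hb0, hbm, hdp, hc⟩ := hdp'
      have hbest_le : pvGetB n best b ≤ a := (hM b hb0 hbm).1 a ha0 hdp
      have hbn : pvGetB n best b < n := lt_of_le_of_lt hbest_le han
      have hmemb : b ∈ PySem.List.pyRange 0 m 1 := PySem.List.mem_pyRange_one.mpr ⟨hb0, hbm⟩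
      rw [pvStepB_char n m t best b' ht2 h0]
      rcases hc with ⟨h1, hxe, hye⟩ | ⟨h2, hxe, hye⟩
      · subst hxe; subst hye
        refine le_trans (hle.2 b' hmemb) ?_
        unfold pvCB
        rw [if_neg (by omega : ¬ n ≤ pvGetB n best b')]
        refine le_trans (min_le_left _ _) ?_
        rw [if_pos ⟨rfl, by omega⟩]
        omega
      · subst hxe; subst hye
        refine le_trans (hle.2 b hmemb) ?_
        unfold pvCB
        rw [if_neg (by omega : ¬ n ≤ pvGetB n best b)]
        refine le_trans (min_le_right _ _) ?_
        rw [if_pos ⟨rfl, h2⟩]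
        omega
    · rw [pvStepB_char n m t best b' ht2 h0]
      rcases hmem with hr | ⟨b, hbmem, hrC⟩
      · exact Or.inl hr
      · by_cases hrn : (PySem.List.pyRange 0 m 1).foldl
            (fun v b => min v (pvCB n m t (pvGetB n best) b b')) n = n
        · exact Or.inl hrn
        · right
          rw [hrC] at hrn ⊢
          obtain ⟨hb0, hbm⟩ := PySem.List.mem_pyRange_one.mp hbmem
          unfold pvCB at hrn ⊢
          by_cases hs : n ≤ pvGetB n best b
          · simp [hs] at hrn
          · simp only [hs, if_false] at hrn ⊢
            have hbb := hM b hb0 hbm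
            have hbdp : 0 ≤ pvGetB n best b ∧ pvGet dp (pvGetB n best b) b = true := by
              rcases hbb.2 with he | hh
              · omega
              · exact hh
            rcases min_cases (if b' = b ∧ pvGetB n best b + t.1 < n then pvGetB n best b + t.1 else n)
                (if b' = b + t.2 ∧ b + t.2 < m then pvGetB n best b else n) with ⟨hv, _⟩ | ⟨hv, _⟩ <;>
              rw [hv] at hrn ⊢
            · split_ifs at hrn ⊢ with hg
              · obtain ⟨hgb, hgn⟩ := hg
                refine ⟨by omega, ?_⟩
                rw [pvStepA_iff n m t dp _ b' hn120 hm120 ht1 ht2 (by omega) h0]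
                exact ⟨pvGetB n best b, b, hbdp.1, by omega, hb0, hbm, hbdp.2,
                  Or.inl ⟨hgn, rfl, hgb⟩⟩
              · exact absurd rfl hrn
            · split_ifs at hrn ⊢ with hg
              · obtain ⟨hgb, hgm⟩ := hg
                refine ⟨hbdp.1, ?_⟩
                rw [pvStepA_iff n m t dp _ b' hn120 hm120 ht1 ht2 hbdp.1 h0]
                exact ⟨pvGetB n best b, b, hbdp.1, by omega, hb0, hbm, hbdp.2,
                  Or.inr ⟨hgm, rfl, hgb⟩⟩
              · exact absurd rfl hrn

lemma pvInv_fold (info : List (Int × Int)) (n m : Int) (dp : List (List Bool)) (best : List Int)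
    (hn : 0 < n) (hm : 0 < m) (hn120 : n ≤ 120) (hm120 : m ≤ 120)
    (hall : ∀ p ∈ info, 0 ≤ p.1 ∧ 0 ≤ p.2)
    (h : pvInv n m dp best) :
    pvInv n m (info.foldl (fun dp t => pvStepA n m t dp) dp)
      (info.foldl (fun best t => pvStepB n m t best) best) := by
  induction info generalizing dp best with
  | nil => exact h
  | cons t info ih =>
    simp only [List.foldl_cons]
    exact ih _ _ (fun p hp => hall p (List.mem_cons_of_mem _ hp))
      (pvInv_step n m t dp best hn hm hn120 hm120
        (hall t List.mem_cons_self).1 (hall t List.mem_cons_self).2 h)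

-- ========== the final scan / min extraction ==========

lemma pvFindIf (l : List Int) (q : Int → Bool) (c : Int) :
    l.findSome? (fun b => if q b then some c else none) = if l.any q then some c else none := by
  induction l with
  | nil => simp
  | cons b l ih => by_cases hb : q b <;> simp [hb, ih]

lemma pvScanLeast (hi : Int) (P : Int → Bool) (r : Int) :
    ∀ (k : Nat) (lo : Int), (hi - lo).toNat ≤ k → lo ≤ r → r < hi → P r = true →
      (∀ a, lo ≤ a → a < hi → P a = true → r ≤ a) →
      (PySem.List.pyRange lo hi 1).findSome? (fun a => if P a then some a else none) = some r := by
  intro k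
  induction k with
  | zero => intro lo hk h1 h2 _ _; omega
  | succ k ih =>
    intro lo hk h1 h2 hP hmin
    rw [PySem.List.pyRange_one_cons (by omega)]
    by_cases hlo : P lo
    · have : r ≤ lo := hmin lo le_rfl (by omega) hlo
      have : r = lo := le_antisymm this h1
      simp [hlo, this]
    · have hne : r ≠ lo := by intro e; rw [e] at hP; rw [hP] at hlo; exact hlo rfl
      rw [List.findSome?_cons]
      simp only [hlo, if_false, Bool.false_eq_true]
      exact ih (lo + 1) (by omega) (by omega) h2 hP
        (fun a ha1 ha2 hPa => hmin a (by omega) ha2 hPa)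

lemma pvMain (n m : Int) (dp : List (List Bool)) (best : List Int)
    (hn : 0 < n) (hm : 0 < m) (h : pvInv n m dp best) :
    ((PySem.List.pyRange 0 n 1).findSome? (fun a =>
        (PySem.List.pyRange 0 m 1).findSome? (fun b => if pvGet dp a b then some a else none))).getD (-1) =
      (if (PySem.List.pyRange 0 m 1).foldl (fun acc b => min acc (pvGetB n best b)) n < n
       then (PySem.List.pyRange 0 m 1).foldl (fun acc b => min acc (pvGetB n best b)) n else -1) := by
  obtain ⟨hSA, hSB, hB, hM⟩ := h
  set r := (PySem.List.pyRange 0 m 1).foldl (fun acc b => min acc (pvGetB n best b)) n with hrdef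
  have hle := pvFoldMin_le (PySem.List.pyRange 0 m 1) (pvGetB n best) n
  have hmem := pvFoldMin_mem (PySem.List.pyRange 0 m 1) (pvGetB n best) n
  simp only [pvFindIf]
  by_cases hrn : r < n
  · rcases hmem with he | ⟨b0, hb0mem, he⟩
    · omega
    · obtain ⟨hb00, hb0m⟩ := PySem.List.mem_pyRange_one.mp hb0mem
      have hbb := hM b0 hb00 hb0m
      have hdp0 : 0 ≤ r ∧ pvGet dp r b0 = true := by
        rcases hbb.2 with h1 | h1
        · omega
        · have her : r = pvGetB n best b0 := by rw [hrdef]; exact he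
          rw [her]; exact h1
      rw [pvScanLeast n (fun a => (PySem.List.pyRange 0 m 1).any (fun b => pvGet dp a b)) r
          (n - 0).toNat 0 le_rfl hdp0.1 hrn
          (List.any_eq_true.mpr ⟨b0, hb0mem, hdp0.2⟩) ?_]
      · simp [hrn]
      · intro a ha0 _ hPa
        obtain ⟨b, hbmem, hab⟩ := List.any_eq_true.mp hPa
        obtain ⟨hb0', hbm'⟩ := PySem.List.mem_pyRange_one.mp hbmem
        exact le_trans (hle.2 b hbmem) ((hM b hb0' hbm').1 a ha0 hab)
  · have hnone : (PySem.List.pyRange 0 n 1).findSome?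
        (fun a => if (PySem.List.pyRange 0 m 1).any (fun b => pvGet dp a b) = true then some a else none)
          = none := by
      rw [List.findSome?_eq_none_iff]
      intro a hamem
      obtain ⟨ha0, _⟩ := PySem.List.mem_pyRange_one.mp hamem
      suffices hq : (PySem.List.pyRange 0 m 1).any (fun b => pvGet dp a b) = false by simp [hq]
      rw [List.any_eq_false]
      intro b hbmem hab
      obtain ⟨hb0', hbm'⟩ := PySem.List.mem_pyRange_one.mp hbmem
      have h1 := (hM b hb0' hbm').1 a ha0 hab
      have h2 := hle.2 b hbmem
      have h3 := (hB a b ha0 hb0' hab).1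
      omega
    rw [hnone]
    simp [hrn]

-- ===== VERDICT (by name: the statement is the Claim_ definition above) =====
theorem solution_spec : Claim_equal_solution := by
  intro info n m hdom hpre
  unfold Spec_solution solution solution_alt
  by_cases hn : n ≤ 0
  · simp only [PySem.List.pyRange_one_eq_nil hn, if_pos (Or.inl hn)]
    simp
  · by_cases hm : m ≤ 0
    · simp only [PySem.List.pyRange_one_eq_nil hm, if_pos (Or.inr hm)]
      have hnone : (List.findSome? (fun _ => (none : Option Int)) (PySem.List.pyRange 0 n 1))
          = none := List.findSome?_eq_none_iff.mpr (fun a _ => rfl)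
      simp [hnone]
    · have hn120 : n ≤ 120 := by rcases hpre.1 with h | h <;> omega
      have hm120 : m ≤ 120 := by rcases hpre.2.1 with h | h <;> omega
      have hinv := pvInv_fold info n m _ _ (by omega) (by omega) hn120 hm120
        (hpre.2.2 (by omega) (by omega))
        (pvInv_init n m (by omega) (by omega) hn120 hm120)
      rw [if_neg (by omega : ¬(n ≤ 0 ∨ m ≤ 0))]
      exact pvMain n m _ _ (by omega) (by omega) hinv
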